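-- pv_equiv track=rewrite | github.com/BulankovEugeniy/split_combinator | get_naturals/modules/make_mixes.py | make_nat_mix_from_rank
-- ===== SOURCE A (Python) =====
-- def make_nat_mix_from_rank(rank):
-- 	result = []
-- 	inside_rank = rank
-- 	for mix_iterator in range(len(rank)):
-- 		current_mix = [0 for i in range(len(rank))]
-- 		max_rank = max(inside_rank)
-- 		for channel_iterator in range(len(rank)):
-- 			if inside_rank[channel_iterator] == -1:
-- 				current_mix[channel_iterator] = 1
-- 		for channel_iterator in range(len(rank)):
-- 			if inside_rank[channel_iterator] == max_rank:
-- 				current_mix[channel_iterator] = 1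
-- 				inside_rank[channel_iterator] = -1
-- 				break
-- 		result.append(current_mix)
-- 	return result
-- ===== SOURCE B (Python) =====
-- def make_nat_mix_from_rank(rank):
--     # Closed-form schedule instead of a step-by-step simulation: each channel with a
--     # valid rank gets a turn-on time (0 if already selected, i.e. rank -1; otherwise
--     # the number of channels picked before it: higher rank, or equal rank at a
--     # smaller index); mix k then shows every channel whose time has come.
--     # Channels without a valid rank (below -1) stay off. Does not mutate its argument.
--     n = len(rank)
--     times = {}
--     for i in range(n):
--         if rank[i] == -1:
--             times[i] = 0
--         elif rank[i] > -1:
--             times[i] = sum(1 for j in range(n)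
--                            if rank[j] > -1
--                            and (rank[j] > rank[i]
--                                 or (rank[j] == rank[i] and j < i)))
--     return [[1 if i in times and times[i] <= k else 0 for i in range(n)]
--             for k in range(n)]
-- ===== Notes on version B (the rewrite author's own statement) =====
-- stated objective: alternative
-- what changed: A simulates the selection by rescanning a mutating copy of rank for its maximum on every outer iteration and flipping one channel at a time; B computes each validly-ranked channel's turn-on time once in closed form (its rank-order statistic: the number of channels with a higher rank, or an equal rank at a smaller index) and emits every cumulative mix directly from that schedule, without mutating its argument.
-- intended difference: On nonempty inputs whose entries are all below -1 (no channel has a valid rank), A still marks the first maximal entry as selected in every mix - an artefact of its unconditional first pick - while B returns all-zero mixes, the intended value since no channel carries a valid rank. — e.g. on make_nat_mix_from_rank([-5]): A returns [[1]], B returns [[0]]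
import Mathlib
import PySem

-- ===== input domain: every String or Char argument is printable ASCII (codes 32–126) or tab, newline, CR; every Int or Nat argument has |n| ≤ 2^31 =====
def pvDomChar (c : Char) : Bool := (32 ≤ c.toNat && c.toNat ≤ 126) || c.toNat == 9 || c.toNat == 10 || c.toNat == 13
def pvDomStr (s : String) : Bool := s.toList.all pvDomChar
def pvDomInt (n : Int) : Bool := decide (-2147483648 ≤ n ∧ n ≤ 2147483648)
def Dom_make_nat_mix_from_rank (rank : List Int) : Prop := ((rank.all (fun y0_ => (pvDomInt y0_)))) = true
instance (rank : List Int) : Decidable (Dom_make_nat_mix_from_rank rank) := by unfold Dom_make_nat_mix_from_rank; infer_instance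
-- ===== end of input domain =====

-- B replaces A's per-iteration max-rescan of a mutating list by a closed-form schedule
-- (each validly-ranked channel's turn-on time is its rank-order statistic); on nonempty
-- inputs whose entries are all < -1 the two differ (see D_ below). A mutates its argument
-- in place, B does not: the equivalence proved here is about the RETURN value only.


-- ===== PORT A =====
-- one iteration of A's outer loop; the list inside always has length n, so getD/set at
-- indices < n are exact for Python's indexing
def pvAStep (n : Nat) (st : List (List Int) × List Int) (_mix : Nat) : List (List Int) × List Int :=
  match st with
  | (result, inside) =>
    -- max(inside_rank): the loop body only runs when inside is nonempty, so getD 0 is never used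
    let maxRank : Int := (PySem.List.max? inside (fun x => x)).getD 0
    let cur1 : List Int := (List.range n).foldl
      (fun c ch => if inside.getD ch 0 = -1 then c.set ch 1 else c) (List.replicate n 0)
    -- the for-loop with break: first channel whose current rank equals maxRank
    match PySem.List.index? inside maxRank with
    | some ch => (result ++ [cur1.set ch 1], inside.set ch (-1))
    | none => (result ++ [cur1], inside)

def make_nat_mix_from_rank (rank : List Int) : List (List Int) :=
  ((List.range rank.length).foldl (pvAStep rank.length) ([], rank)).1

-- ===== PORT B =====
-- channel j is picked strictly before channel i (higher rank, or equal rank at a smaller index)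
def pvBefore (rank : List Int) (j i : Nat) : Bool :=
  rank.getD j 0 > rank.getD i 0 || (rank.getD j 0 == rank.getD i 0 && decide (j < i))

-- the generator-sum of Source B: how many channels are picked strictly before channel i
def pvBTime (rank : List Int) (i : Nat) : Int :=
  (((List.range rank.length).countP
      (fun j => decide (-1 < rank.getD j 0) && pvBefore rank j i)) : Int)

-- one iteration of Source B's times-building loop (dict → PySem.Dict)
def pvBStep (rank : List Int) (d : PySem.Dict Int Int) (i : Nat) : PySem.Dict Int Int :=
  if rank.getD i 0 = -1 then d.insert (i : Int) 0
  else if -1 < rank.getD i 0 then d.insert (i : Int) (pvBTime rank i)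
  else d

def make_nat_mix_from_rank_alt (rank : List Int) : List (List Int) :=
  let times := (List.range rank.length).foldl (pvBStep rank) PySem.Dict.empty
  (List.range rank.length).map (fun (k : Nat) =>
    (List.range rank.length).map (fun (i : Nat) =>
      match times.get? (i : Int) with
      | some t => if t ≤ (k : Int) then (1 : Int) else 0
      | none => 0))

-- ===== PRECONDITION & SPEC =====
-- On nonempty inputs whose entries are all below -1 (no channel has a valid rank), A still
-- marks the first maximal entry as selected in every mix — an artefact of its unconditional
-- first pick — while B returns all-zero mixes, the intended value since no channel carries
-- a valid rank.
def D_make_nat_mix_from_rank (rank : List Int) : Prop :=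
  rank ≠ [] ∧ ∀ v ∈ rank, v < -1
instance (rank : List Int) : Decidable (D_make_nat_mix_from_rank rank) := by
  unfold D_make_nat_mix_from_rank; infer_instance

def Spec_make_nat_mix_from_rank (rank : List Int) (out : List (List Int)) : Prop :=
  ¬ D_make_nat_mix_from_rank rank → out = make_nat_mix_from_rank_alt rank
instance (rank : List Int) (out : List (List Int)) : Decidable (Spec_make_nat_mix_from_rank rank out) := by
  unfold Spec_make_nat_mix_from_rank; infer_instance

def pvDiffWitness_make_nat_mix_from_rank : List Int := [-5]
def pvDiffWitnessOut_make_nat_mix_from_rank : (List (List Int)) × (List (List Int)) :=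
  ([[1]], [[0]])

-- ===== CLAIM (what is proved, stated in full; the proofs are below) =====
def Claim_unchanged_make_nat_mix_from_rank : Prop :=
  ∀ (rank : List Int), Dom_make_nat_mix_from_rank rank →
    Spec_make_nat_mix_from_rank rank (make_nat_mix_from_rank rank)
def Claim_changed_make_nat_mix_from_rank : Prop :=
  Dom_make_nat_mix_from_rank (pvDiffWitness_make_nat_mix_from_rank) ∧
  D_make_nat_mix_from_rank (pvDiffWitness_make_nat_mix_from_rank) ∧
  make_nat_mix_from_rank (pvDiffWitness_make_nat_mix_from_rank) = pvDiffWitnessOut_make_nat_mix_from_rank.1 ∧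
  make_nat_mix_from_rank_alt (pvDiffWitness_make_nat_mix_from_rank) = pvDiffWitnessOut_make_nat_mix_from_rank.2 ∧
  pvDiffWitnessOut_make_nat_mix_from_rank.1 ≠ pvDiffWitnessOut_make_nat_mix_from_rank.2
def Claim_exact_make_nat_mix_from_rank : Prop :=
  ∀ (rank : List Int), Dom_make_nat_mix_from_rank rank → D_make_nat_mix_from_rank rank →
    make_nat_mix_from_rank rank ≠ make_nat_mix_from_rank_alt rank

-- ===== LEMMAS AND PROOFS =====

-- the active channels (value > -1) in index order
def pvPosList (rank : List Int) : List Nat :=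
  (List.range rank.length).filter (fun i => -1 < rank.getD i 0)

-- the rank-order statistic of an active channel
def pvT (rank : List Int) (i : Nat) : Int :=
  (((pvPosList rank).countP (fun j => pvBefore rank j i)) : Int)

-- the schedule: first mix index at which channel i turns on (none = never)
def pvSig (r : List Int) (i : Nat) : Option Int :=
  if r.getD i 0 = -1 then some 0
  else if -1 < r.getD i 0 then some (pvT r i)
  else none

-- channel i has been set to -1 before iteration k
def pvConsumed (r : List Int) (i k : Nat) : Bool :=
  match pvSig r i with
  | some a => decide (a < (k : Int))
  | none => false

-- the value of A's inside_rank before iteration k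
def pvMask (r : List Int) (k : Nat) : List Int :=
  (List.range r.length).map (fun i => if pvConsumed r i k then -1 else r.getD i 0)

-- B's k-th output row, phrased through the schedule
def pvRow (r : List Int) (k : Nat) : List Int :=
  (List.range r.length).map (fun i =>
    match pvSig r i with
    | some t => if t ≤ (k : Int) then (1 : Int) else 0
    | none => 0)

-- ---------- the schedule ----------
theorem pv_sig_def (r : List Int) (i : Nat) (_hi : i < r.length) :
    pvSig r i = (if r.getD i 0 = -1 then some 0
      else if -1 < r.getD i 0 then some (pvT r i) else none) := rfl

theorem pv_sig_nonneg (r : List Int) (i : Nat) (a : Int) (h : pvSig r i = some a) : 0 ≤ a := by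
  unfold pvSig at h
  split_ifs at h <;> simp_all
  rw [← h]; unfold pvT; positivity

theorem pv_consumed_main (r : List Int) (i : Nat) (_hi : i < r.length) (k : Nat) :
    pvConsumed r i k = true ↔
      ((r.getD i 0 = -1 ∧ 0 < k) ∨ (-1 < r.getD i 0 ∧ pvT r i < (k : Int))) := by
  unfold pvConsumed pvSig
  split_ifs with h1 h2
  · simp only [decide_eq_true_eq]; omega
  · simp only [decide_eq_true_eq]; omega
  · simp only [false_iff]; omega

-- ---------- the mask ----------
theorem pv_length_mask (r : List Int) (k : Nat) : (pvMask r k).length = r.length := by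
  simp [pvMask]

theorem pv_mask_getElem? (r : List Int) (k i : Nat) (hi : i < r.length) :
    (pvMask r k)[i]? = some (if pvConsumed r i k then -1 else r.getD i 0) := by
  simp [pvMask, List.getElem?_map, List.getElem?_range hi]

theorem pv_mask_getD (r : List Int) (k i : Nat) (hi : i < r.length) :
    (pvMask r k).getD i 0 = if pvConsumed r i k then -1 else r.getD i 0 := by
  rw [List.getD_eq_getElem?_getD, pv_mask_getElem? r k i hi]
  rfl

theorem pv_mask_zero (r : List Int) : pvMask r 0 = r := by
  apply List.ext_getElem?
  intro i
  by_cases hi : i < r.length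
  · rw [pv_mask_getElem? r 0 i hi, List.getElem?_eq_getElem hi]
    have : pvConsumed r i 0 = false := by
      unfold pvConsumed
      cases h : pvSig r i with
      | none => rfl
      | some a => simpa using pv_sig_nonneg r i a h
    simp [this, List.getElem?_eq_getElem hi]
  · rw [List.getElem?_eq_none (by rw [pv_length_mask]; omega), List.getElem?_eq_none (by omega)]

-- ---------- the selection order ----------
theorem pv_mem_pos (r : List Int) (i : Nat) :
    i ∈ pvPosList r ↔ i < r.length ∧ -1 < r.getD i 0 := by
  simp [pvPosList, List.mem_filter, List.mem_range]

theorem pv_pos_nodup (r : List Int) : (pvPosList r).Nodup :=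
  List.Nodup.filter _ List.nodup_range

theorem pv_before_trans (r : List Int) {x j i : Nat}
    (h1 : pvBefore r x j = true) (h2 : pvBefore r j i = true) : pvBefore r x i = true := by
  unfold pvBefore at *
  simp only [Bool.or_eq_true, Bool.and_eq_true, decide_eq_true_eq, beq_iff_eq] at *
  omega

theorem pv_before_total (r : List Int) {i j : Nat} (hne : i ≠ j) :
    pvBefore r i j = true ∨ pvBefore r j i = true := by
  unfold pvBefore
  simp only [Bool.or_eq_true, Bool.and_eq_true, decide_eq_true_eq, beq_iff_eq]
  omega

theorem pv_before_irrefl (r : List Int) (i : Nat) : pvBefore r i i = false := by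
  simp [pvBefore]

theorem pv_T_lt (r : List Int) {j i : Nat} (hj : j ∈ pvPosList r) (hi : i ∈ pvPosList r)
    (hb : pvBefore r j i = true) : pvT r j < pvT r i := by
  obtain ⟨l1, l2, hsplit⟩ := List.append_of_mem hj
  unfold pvT
  rw [hsplit, List.countP_append, List.countP_append, List.countP_cons, List.countP_cons]
  rw [if_pos hb, if_neg (by rw [pv_before_irrefl]; simp)]
  have m1 : l1.countP (fun x => pvBefore r x j) ≤ l1.countP (fun x => pvBefore r x i) :=
    List.countP_mono_left (fun x _ hx => pv_before_trans r hx hb)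
  have m2 : l2.countP (fun x => pvBefore r x j) ≤ l2.countP (fun x => pvBefore r x i) :=
    List.countP_mono_left (fun x _ hx => pv_before_trans r hx hb)
  omega

theorem pv_T_lt_len (r : List Int) {i : Nat} (hi : i ∈ pvPosList r) :
    pvT r i < ((pvPosList r).length : Int) := by
  obtain ⟨l1, l2, hsplit⟩ := List.append_of_mem hi
  unfold pvT
  rw [hsplit, List.countP_append, List.countP_cons]
  rw [if_neg (by rw [pv_before_irrefl]; simp)]
  have m1 := List.countP_le_length (l := l1) (p := fun x => pvBefore r x i)
  have m2 := List.countP_le_length (l := l2) (p := fun x => pvBefore r x i)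
  simp only [List.length_append, List.length_cons]
  omega

theorem pv_T_inj (r : List Int) {i j : Nat} (hi : i ∈ pvPosList r) (hj : j ∈ pvPosList r)
    (he : pvT r i = pvT r j) : i = j := by
  by_contra hne
  rcases pv_before_total r hne with h | h
  · have := pv_T_lt r hi hj h; omega
  · have := pv_T_lt r hj hi h; omega

theorem pv_exists_T (r : List Int) {k : Nat} (hk : k < (pvPosList r).length) :
    ∃ i ∈ pvPosList r, pvT r i = (k : Int) := by
  set pos := pvPosList r with hpos
  set f : Nat → Nat := fun i => pos.countP (fun j => pvBefore r j i) with hf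
  have himg : Finset.image f pos.toFinset = Finset.range pos.length := by
    apply Finset.eq_of_subset_of_card_le
    · intro x hx
      simp only [Finset.mem_image, List.mem_toFinset] at hx
      obtain ⟨i, hi, rfl⟩ := hx
      have := pv_T_lt_len r (i := i) (by rw [← hpos]; exact hi)
      rw [Finset.mem_range]
      unfold pvT at this
      exact_mod_cast this
    · rw [Finset.card_range, Finset.card_image_of_injOn, List.toFinset_card_of_nodup]
      · exact pv_pos_nodup r
      · intro a ha b hb hab
        simp only [Finset.mem_coe, List.mem_toFinset] at ha hb
        apply pv_T_inj r (by rw [← hpos]; exact ha) (by rw [← hpos]; exact hb)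
        unfold pvT
        rw [← hpos]
        exact_mod_cast hab
  have hk' : k ∈ Finset.image f pos.toFinset := by rw [himg, Finset.mem_range]; exact hk
  simp only [Finset.mem_image, List.mem_toFinset] at hk'
  obtain ⟨i, hi, he⟩ := hk'
  exact ⟨i, hi, by unfold pvT; rw [← hpos, ← he]⟩

-- ---------- small helpers for A's loop body ----------
theorem pv_markfold_length (inside : List Int) (m : Nat) (acc : List Int) :
    ((List.range m).foldl (fun c ch => if inside.getD ch 0 = -1 then c.set ch 1 else c) acc).length
      = acc.length := by
  induction m with
  | zero => simp
  | succ m ih =>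
    rw [List.range_succ, List.foldl_append]
    simp only [List.foldl_cons, List.foldl_nil]
    split
    · rw [List.length_set]; exact ih
    · exact ih

theorem pv_markfold_getElem? (inside : List Int) (m : Nat) (acc : List Int) (j : Nat) :
    ((List.range m).foldl (fun c ch => if inside.getD ch 0 = -1 then c.set ch 1 else c) acc)[j]?
      = if inside.getD j 0 = -1 ∧ j < m then (if j < acc.length then some 1 else acc[j]?)
        else acc[j]? := by
  induction m with
  | zero => simp
  | succ m ih =>
    rw [List.range_succ, List.foldl_append]
    simp only [List.foldl_cons, List.foldl_nil]
    by_cases hm : inside.getD m 0 = -1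
    · rw [if_pos hm, List.getElem?_set, pv_markfold_length]
      by_cases hj : m = j
      · subst hj
        rw [if_pos rfl]
        split_ifs <;> first | rfl | (exfalso; omega) | (rw [List.getElem?_eq_none (by omega)])
      · rw [if_neg hj, ih]
        split_ifs <;> first | rfl | (exfalso; omega)
    · rw [if_neg hm, ih]
      by_cases hj : j = m
      · subst hj
        split_ifs <;> first | rfl | (exfalso; omega)
      · split_ifs <;> first | rfl | (exfalso; omega)

theorem pv_mark_eq (inside : List Int) (n : Nat) :
    (List.range n).foldl (fun c ch => if inside.getD ch 0 = -1 then c.set ch 1 else c)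
        (List.replicate n (0:Int))
      = (List.range n).map (fun i => if inside.getD i 0 = -1 then (1:Int) else 0) := by
  apply List.ext_getElem?
  intro j
  rw [pv_markfold_getElem?]
  by_cases hj : j < n
  · rw [List.getElem?_map, List.getElem?_range hj]
    simp only [List.length_replicate, List.getElem?_replicate]
    split_ifs <;> simp_all
  · rw [if_neg (by omega), List.getElem?_eq_none (by simp only [List.length_replicate]; omega),
      List.getElem?_eq_none (by simp only [List.length_map, List.length_range]; omega)]

theorem pv_max_eq (xs : List Int) (m : Int) (hm : m ∈ xs) (hle : ∀ y ∈ xs, y ≤ m) :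
    PySem.List.max? xs (fun x => x) = some m := by
  cases h : PySem.List.max? xs (fun x => x) with
  | none =>
    rw [PySem.List.max?_eq_none_iff] at h
    subst h; simp at hm
  | some m' =>
    have h1 := PySem.List.max?_isMax h m hm
    have h2 := PySem.List.max?_mem h
    have : m' = m := le_antisymm (hle m' h2) h1
    rw [this]

theorem pv_index_eq (xs : List Int) (v : Int) (i : Nat) (hi : i < xs.length) (hv : xs[i] = v)
    (hprev : ∀ j, j < i → xs[j]? ≠ some v) : PySem.List.index? xs v = some i := by
  rw [PySem.List.index?_eq_some_iff]
  refine ⟨xs.take i, xs.drop (i + 1), ?_, by rw [List.length_take]; omega, ?_⟩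
  · conv_lhs => rw [← List.take_append_drop i xs, List.drop_eq_getElem_cons hi, hv]
  · intro hmem
    rw [List.mem_take_iff_getElem] at hmem
    obtain ⟨j, hj, he⟩ := hmem
    have hj' : j < i := by simp at hj; omega
    exact hprev j hj' (by rw [List.getElem?_eq_getElem (by omega)]; rw [he])

theorem pv_row_length (r : List Int) (k : Nat) : (pvRow r k).length = r.length := by
  simp [pvRow]

theorem pv_row_getElem? (r : List Int) (k i : Nat) (hi : i < r.length) :
    (pvRow r k)[i]? = some (match pvSig r i with
      | some t => if t ≤ (k : Int) then (1:Int) else 0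
      | none => 0) := by
  simp [pvRow, List.getElem?_map, List.getElem?_range hi]

-- ---------- the two shapes of one iteration of A ----------
-- iteration k picks a fresh channel i0 (the current first argmax)
theorem pv_pick (r : List Int) (k : Nat) (res : List (List Int)) (x : Nat) (i0 : Nat)
    (hi0 : i0 < r.length)
    (hval : (pvMask r k).getD i0 0 = r.getD i0 0)
    (hle : ∀ j, j < r.length → (pvMask r k).getD j 0 ≤ r.getD i0 0)
    (hfirst : ∀ j, j < i0 → (pvMask r k).getD j 0 ≠ r.getD i0 0)
    (hmask : pvMask r (k + 1) = (pvMask r k).set i0 (-1))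
    (hrow : ∀ j, j < r.length →
      (((pvMask r k).getD j 0 = -1 ∨ j = i0) ↔ ∃ a, pvSig r j = some a ∧ a ≤ (k : Int))) :
    pvAStep r.length (res, pvMask r k) x = (res ++ [pvRow r k], pvMask r (k + 1)) := by
  have hlen := pv_length_mask r k
  have hmem : (pvMask r k)[i0]? = some (r.getD i0 0) := by
    rw [List.getElem?_eq_getElem (by omega), ← List.getD_eq_getElem _ 0 (by omega), hval]
  have hmax : PySem.List.max? (pvMask r k) (fun y => y) = some (r.getD i0 0) := by
    apply pv_max_eq
    · exact List.mem_of_getElem? hmem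
    · intro y hy
      obtain ⟨j, hjlt, rfl⟩ := List.mem_iff_getElem.mp hy
      have := hle j (by omega)
      rwa [List.getD_eq_getElem _ 0 hjlt] at this
  have hidx : PySem.List.index? (pvMask r k) (r.getD i0 0) = some i0 := by
    apply pv_index_eq _ _ _ (by omega)
    · have := hval; rwa [List.getD_eq_getElem _ 0 (by omega)] at this
    · intro j hj he
      rw [List.getElem?_eq_getElem (by omega)] at he
      exact hfirst j hj (by rw [List.getD_eq_getElem _ 0 (by omega)]; exact Option.some_inj.mp he)
  have hcur : ((List.range r.length).map
        (fun i => if (pvMask r k).getD i 0 = -1 then (1:Int) else 0)).set i0 1 = pvRow r k := by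
    apply List.ext_getElem?
    intro j
    rw [List.getElem?_set]
    by_cases hj : j < r.length
    · rw [pv_row_getElem? r k j hj]
      by_cases hji : i0 = j
      · subst hji
        rw [if_pos rfl, if_pos (by simp; omega)]
        obtain ⟨a, ha, hak⟩ := (hrow i0 (by omega)).mp (Or.inr rfl)
        rw [ha]
        simp [hak]
      · rw [if_neg hji, List.getElem?_map, List.getElem?_range hj, Option.map_some]
        by_cases hc : (pvMask r k).getD j 0 = -1
        · obtain ⟨a, ha, hak⟩ := (hrow j hj).mp (Or.inl hc)
          rw [ha, if_pos hc]
          simp [hak]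
        · have hno : ¬ ∃ a, pvSig r j = some a ∧ a ≤ (k:Int) := by
            intro hex
            rcases (hrow j hj).mpr hex with h | h
            · exact hc h
            · exact hji h.symm
          rw [if_neg hc]
          cases hs : pvSig r j with
          | none => rfl
          | some a =>
            have : ¬ (a ≤ (k:Int)) := fun hle' => hno ⟨a, hs, hle'⟩
            simp [this]
    · rw [if_neg (by omega), List.getElem?_eq_none (by simp; omega),
        List.getElem?_eq_none (by rw [pv_row_length]; omega)]
  unfold pvAStep
  dsimp only
  rw [hmax, Option.getD_some, hidx, pv_mark_eq]
  dsimp only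
  rw [hcur, hmask]
-- iteration k is frozen: the max is -1 and re-setting it changes nothing
theorem pv_steady (r : List Int) (k : Nat) (res : List (List Int)) (x : Nat)
    (hmem : ∃ j, j < r.length ∧ (pvMask r k).getD j 0 = -1)
    (hle : ∀ j, j < r.length → (pvMask r k).getD j 0 ≤ -1)
    (hmask : pvMask r (k + 1) = pvMask r k)
    (hrow : ∀ j, j < r.length →
      ((pvMask r k).getD j 0 = -1 ↔ ∃ a, pvSig r j = some a ∧ a ≤ (k : Int))) :
    pvAStep r.length (res, pvMask r k) x = (res ++ [pvRow r k], pvMask r (k + 1)) := by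
  have hlen := pv_length_mask r k
  obtain ⟨j0, hj0, hj0v⟩ := hmem
  have hmemv : (pvMask r k)[j0]? = some (-1) := by
    rw [List.getElem?_eq_getElem (by omega), ← List.getD_eq_getElem _ 0 (by omega), hj0v]
  have hmax : PySem.List.max? (pvMask r k) (fun y => y) = some (-1) := by
    apply pv_max_eq
    · exact List.mem_of_getElem? hmemv
    · intro y hy
      obtain ⟨j, hjlt, rfl⟩ := List.mem_iff_getElem.mp hy
      have := hle j (by omega)
      rwa [List.getD_eq_getElem _ 0 hjlt] at this
  obtain ⟨c, hc⟩ : ∃ c, PySem.List.index? (pvMask r k) (-1) = some c := by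
    cases h : PySem.List.index? (pvMask r k) (-1) with
    | none =>
      rw [PySem.List.index?_eq_none_iff] at h
      exact absurd (List.mem_of_getElem? hmemv) h
    | some c => exact ⟨c, rfl⟩
  obtain ⟨hclt, hcv, _⟩ := PySem.List.getElem_of_index?_eq_some hc
  have hcn : c < r.length := by omega
  have hcgd : (pvMask r k).getD c 0 = -1 := by rw [List.getD_eq_getElem _ 0 hclt]; exact hcv
  have hset : (pvMask r k).set c (-1) = pvMask r k := by
    apply List.ext_getElem?
    intro j
    rw [List.getElem?_set]
    by_cases hj : c = j
    · subst hj
      rw [if_pos rfl, if_pos hclt, List.getElem?_eq_getElem hclt, hcv]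
    · rw [if_neg hj]
  have hcur : ((List.range r.length).map
        (fun i => if (pvMask r k).getD i 0 = -1 then (1:Int) else 0)).set c 1 = pvRow r k := by
    apply List.ext_getElem?
    intro j
    rw [List.getElem?_set]
    by_cases hj : j < r.length
    · rw [pv_row_getElem? r k j hj]
      have hcore : (if (pvMask r k).getD j 0 = -1 then (1:Int) else 0)
          = (match pvSig r j with
             | some t => if t ≤ (k : Int) then (1:Int) else 0
             | none => 0) := by
        by_cases hcj : (pvMask r k).getD j 0 = -1
        · obtain ⟨a, ha, hak⟩ := (hrow j hj).mp hcj
          rw [ha, if_pos hcj]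
          simp [hak]
        · rw [if_neg hcj]
          cases hs : pvSig r j with
          | none => rfl
          | some a =>
            have : ¬ (a ≤ (k:Int)) := fun hle' => hcj ((hrow j hj).mpr ⟨a, hs, hle'⟩)
            simp [this]
      by_cases hji : c = j
      · subst hji
        rw [if_pos rfl, if_pos (by simp; omega), ← hcore, if_pos hcgd]
      · rw [if_neg hji, List.getElem?_map, List.getElem?_range hj, Option.map_some, hcore]
    · rw [if_neg (by omega), List.getElem?_eq_none (by simp; omega),
        List.getElem?_eq_none (by rw [pv_row_length]; omega)]
  unfold pvAStep
  dsimp only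
  rw [hmax, Option.getD_some, hc, pv_mark_eq]
  dsimp only
  rw [hcur, hmask, hset]

theorem pv_step (r : List Int) (hall : ¬ ∀ v ∈ r, v < -1)
    (k : Nat) (res : List (List Int)) (x : Nat) :
    pvAStep r.length (res, pvMask r k) x = (res ++ [pvRow r k], pvMask r (k + 1)) := by
  have hcons := pv_consumed_main r
  have hsig := pv_sig_def r
  by_cases hkP : k < (pvPosList r).length
  · obtain ⟨i0, hi0pos, hi0T⟩ := pv_exists_T r hkP
    obtain ⟨hi0n, hi0v⟩ := (pv_mem_pos r i0).mp hi0pos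
    have hi0nc : ¬ (pvConsumed r i0 k = true) := by
      rw [hcons i0 hi0n k]
      omega
    apply pv_pick r k res x i0 hi0n
    · rw [pv_mask_getD _ _ _ hi0n, if_neg hi0nc]
    · intro j hj
      rw [pv_mask_getD _ _ _ hj]
      split_ifs with h1
      · omega
      · by_contra hgt
        push_neg at hgt
        have hjpos : j ∈ pvPosList r := (pv_mem_pos r j).mpr ⟨hj, by omega⟩
        have hb : pvBefore r j i0 = true := by
          simp only [pvBefore, Bool.or_eq_true, decide_eq_true_eq]
          left; omega
        have := pv_T_lt r hjpos hi0pos hb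
        exact h1 ((hcons j hj k).mpr (Or.inr ⟨by omega, by omega⟩))
    · intro j hjlt he
      have hj : j < r.length := by omega
      rw [pv_mask_getD _ _ _ hj] at he
      split_ifs at he with h1
      · omega
      · have hjpos : j ∈ pvPosList r := (pv_mem_pos r j).mpr ⟨hj, by omega⟩
        have hb : pvBefore r j i0 = true := by
          simp only [pvBefore, Bool.or_eq_true, Bool.and_eq_true, decide_eq_true_eq, beq_iff_eq]
          right; exact ⟨he, hjlt⟩
        have := pv_T_lt r hjpos hi0pos hb
        exact h1 ((hcons j hj k).mpr (Or.inr ⟨by omega, by omega⟩))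
    · apply List.ext_getElem?
      intro j
      by_cases hj : j < r.length
      · have hset : ((pvMask r k).set i0 (-1))[j]? =
            if i0 = j then some (-1) else (pvMask r k)[j]? := by
          rw [List.getElem?_set, pv_length_mask]
          split_ifs <;> first | rfl | (exfalso; omega)
        rw [pv_mask_getElem? _ _ _ hj, hset]
        by_cases hji : i0 = j
        · subst hji
          rw [if_pos rfl, if_pos ((hcons i0 hi0n (k+1)).mpr (Or.inr ⟨hi0v, by omega⟩))]
        · rw [if_neg hji, pv_mask_getElem? _ _ _ hj]
          by_cases h1 : pvConsumed r j (k+1) = true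
          · rw [if_pos h1]
            rcases (hcons j hj (k+1)).mp h1 with ⟨hv, _⟩ | ⟨hv, hT⟩
            · by_cases h2 : pvConsumed r j k = true
              · rw [if_pos h2]
              · rw [if_neg h2, hv]
            · have hT' : pvT r j < (k : Int) := by
                rcases lt_or_eq_of_le (by omega : pvT r j ≤ (k:Int)) with h | h
                · exact h
                · exfalso
                  exact hji (pv_T_inj r hi0pos ((pv_mem_pos r j).mpr ⟨hj, hv⟩) (by omega))
              rw [if_pos ((hcons j hj k).mpr (Or.inr ⟨hv, hT'⟩))]
          · have h2 : ¬ (pvConsumed r j k = true) := by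
              intro h2
              apply h1
              rcases (hcons j hj k).mp h2 with ⟨hv, hp⟩ | ⟨hv, hT⟩
              · exact (hcons j hj (k+1)).mpr (Or.inl ⟨hv, by omega⟩)
              · exact (hcons j hj (k+1)).mpr (Or.inr ⟨hv, by omega⟩)
            rw [if_neg h1, if_neg h2]
      · rw [List.getElem?_eq_none (by rw [pv_length_mask]; omega),
          List.getElem?_eq_none (by rw [List.length_set, pv_length_mask]; omega)]
    · intro j hj
      rw [pv_mask_getD _ _ _ hj]
      constructor
      · intro h1
        rcases h1 with h1 | rfl
        · split_ifs at h1 with h2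
          · rcases (hcons j hj k).mp h2 with ⟨hv, hp⟩ | ⟨hv, hT⟩
            · exact ⟨0, by rw [hsig j hj, if_pos hv], Int.natCast_nonneg k⟩
            · exact ⟨pvT r j, by rw [hsig j hj, if_neg (by omega), if_pos hv], by omega⟩
          · exact ⟨0, by rw [hsig j hj, if_pos h1], Int.natCast_nonneg k⟩
        · exact ⟨pvT r j, by rw [hsig j hj, if_neg (by omega), if_pos hi0v], by omega⟩
      · rintro ⟨a, ha, hak⟩
        rw [hsig j hj] at ha
        split_ifs at ha with h1 h2
        · left
          split_ifs with h2
          · rfl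
          · exact h1
        · obtain rfl : a = pvT r j := (Option.some_inj.mp ha).symm
          rcases lt_or_eq_of_le hak with h | h
          · left
            rw [if_pos ((hcons j hj k).mpr (Or.inr ⟨h2, h⟩))]
          · right
            exact pv_T_inj r ((pv_mem_pos r j).mpr ⟨hj, h2⟩) hi0pos (by omega)
  · -- all positive channels consumed: frozen
    apply pv_steady r k res x
    · push_neg at hall
      obtain ⟨v, hv, hvge⟩ := hall
      obtain ⟨jv, hjv, rfl⟩ := List.mem_iff_getElem.mp hv
      refine ⟨jv, hjv, ?_⟩
      rw [pv_mask_getD _ _ _ hjv]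
      have hgd : r.getD jv 0 = r[jv] := List.getD_eq_getElem r 0 hjv
      rcases lt_or_eq_of_le (by omega : (-1:Int) ≤ r[jv]) with hgt | heq
      · have hjpos : jv ∈ pvPosList r := (pv_mem_pos r jv).mpr ⟨hjv, by omega⟩
        have := pv_T_lt_len r hjpos
        rw [if_pos ((hcons jv hjv k).mpr (Or.inr ⟨by omega, by omega⟩))]
      · split_ifs <;> omega
    · intro j hj
      rw [pv_mask_getD _ _ _ hj]
      split_ifs with h1
      · omega
      · by_contra hgt
        push_neg at hgt
        have hjpos : j ∈ pvPosList r := (pv_mem_pos r j).mpr ⟨hj, by omega⟩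
        have := pv_T_lt_len r hjpos
        exact h1 ((hcons j hj k).mpr (Or.inr ⟨by omega, by omega⟩))
    · apply List.ext_getElem?
      intro j
      by_cases hj : j < r.length
      · rw [pv_mask_getElem? _ _ _ hj, pv_mask_getElem? _ _ _ hj]
        by_cases h1 : pvConsumed r j (k+1) = true
        · rw [if_pos h1]
          rcases (hcons j hj (k+1)).mp h1 with ⟨hv, _⟩ | ⟨hv, hT⟩
          · by_cases h2 : pvConsumed r j k = true
            · rw [if_pos h2]
            · rw [if_neg h2, hv]
          · have hjpos : j ∈ pvPosList r := (pv_mem_pos r j).mpr ⟨hj, hv⟩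
            have := pv_T_lt_len r hjpos
            rw [if_pos ((hcons j hj k).mpr (Or.inr ⟨hv, by omega⟩))]
        · have h2 : ¬ (pvConsumed r j k = true) := by
            intro h2
            apply h1
            rcases (hcons j hj k).mp h2 with ⟨hv, hp⟩ | ⟨hv, hT⟩
            · exact (hcons j hj (k+1)).mpr (Or.inl ⟨hv, by omega⟩)
            · exact (hcons j hj (k+1)).mpr (Or.inr ⟨hv, by omega⟩)
          rw [if_neg h1, if_neg h2]
      · rw [List.getElem?_eq_none (by rw [pv_length_mask]; omega),
          List.getElem?_eq_none (by rw [pv_length_mask]; omega)]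
    · intro j hj
      rw [pv_mask_getD _ _ _ hj]
      constructor
      · intro h1
        split_ifs at h1 with h2
        · rcases (hcons j hj k).mp h2 with ⟨hv, hp⟩ | ⟨hv, hT⟩
          · exact ⟨0, by rw [hsig j hj, if_pos hv], Int.natCast_nonneg k⟩
          · exact ⟨pvT r j, by rw [hsig j hj, if_neg (by omega), if_pos hv], by omega⟩
        · exact ⟨0, by rw [hsig j hj, if_pos h1], Int.natCast_nonneg k⟩
      · rintro ⟨a, ha, hak⟩
        rw [hsig j hj] at ha
        split_ifs at ha with h1 h2
        · split_ifs with h2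
          · rfl
          · exact h1
        · have hjpos : j ∈ pvPosList r := (pv_mem_pos r j).mpr ⟨hj, h2⟩
          have := pv_T_lt_len r hjpos
          rw [if_pos ((hcons j hj k).mpr (Or.inr ⟨h2, by omega⟩))]

theorem pv_loop (r : List Int) (hall : ¬ ∀ v ∈ r, v < -1) : ∀ k, k ≤ r.length →
    (List.range k).foldl (pvAStep r.length) ([], r) = ((List.range k).map (pvRow r), pvMask r k) := by
  intro k
  induction k with
  | zero => intro _; simp [pv_mask_zero]
  | succ k ih =>
    intro h
    rw [List.range_succ, List.foldl_append, ih (by omega), List.map_append]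
    simpa using pv_step r hall k _ k

-- ---------- B's port computes the schedule ----------
theorem pv_btime_eq (r : List Int) (i : Nat) : pvBTime r i = pvT r i := by
  unfold pvBTime pvT pvPosList
  rw [List.countP_filter]
  congr 1
  exact List.countP_congr (fun a _ => by rw [Bool.and_comm])

theorem pv_bstep_sig (r : List Int) (d : PySem.Dict Int Int) (i : Nat) :
    pvBStep r d i = (match pvSig r i with
      | some t => d.insert (i : Int) t
      | none => d) := by
  unfold pvBStep pvSig
  split_ifs with h1 h2
  · rfl
  · rw [pv_btime_eq]
  · rfl

theorem pv_times_get? (r : List Int) (l : List Nat) (d : PySem.Dict Int Int) (j : Nat) :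
    (l.foldl (pvBStep r) d).get? (j : Int)
      = if j ∈ l ∧ (pvSig r j).isSome then pvSig r j else d.get? (j : Int) := by
  induction l generalizing d with
  | nil => simp
  | cons a t ih =>
    rw [List.foldl_cons, ih, pv_bstep_sig]
    by_cases hm : j ∈ t ∧ (pvSig r j).isSome
    · rw [if_pos hm, if_pos ⟨List.mem_cons_of_mem _ hm.1, hm.2⟩]
    · rw [if_neg hm]
      by_cases hja : j = a
      · subst hja
        cases hs : pvSig r j with
        | some t0 =>
          dsimp only
          rw [PySem.Dict.get?_insert_self, if_pos ⟨List.mem_cons_self, rfl⟩]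
        | none =>
          dsimp only
          rw [if_neg (by rintro ⟨_, h⟩; simp at h)]
      · have hne : (j : Int) ≠ (a : Int) := by
          intro h; exact hja (by exact_mod_cast h)
        have hcond : ¬ (j ∈ a :: t ∧ (pvSig r j).isSome = true) := by
          rintro ⟨hmem, hsome⟩
          rcases List.mem_cons.mp hmem with h | h
          · exact hja h
          · exact hm ⟨h, hsome⟩
        cases hs : pvSig r a with
        | some t0 =>
          dsimp only
          rw [PySem.Dict.get?_insert_of_ne _ _ hne, if_neg hcond]
        | none =>
          dsimp only
          rw [if_neg hcond]

theorem pv_alt_eq (r : List Int) :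
    make_nat_mix_from_rank_alt r = (List.range r.length).map (pvRow r) := by
  unfold make_nat_mix_from_rank_alt
  dsimp only
  apply List.map_congr_left
  intro k _
  unfold pvRow
  apply List.map_congr_left
  intro i hi
  rw [pv_times_get? r (List.range r.length) PySem.Dict.empty i]
  cases hs : pvSig r i with
  | some t => rw [if_pos ⟨hi, rfl⟩]
  | none => rw [if_neg (by rintro ⟨_, h⟩; simp at h), PySem.Dict.get?_empty]

-- one step of A's fold only appends to the result list
theorem pv_astep_fst (n : Nat) (st : List (List Int) × List Int) (x : Nat) :
    ∃ u, (pvAStep n st x).1 = st.1 ++ u := by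
  unfold pvAStep
  rcases st with ⟨res, ins⟩
  dsimp only
  split
  · exact ⟨_, rfl⟩
  · exact ⟨_, rfl⟩

-- the result list of A's fold only grows by appending
theorem pv_fold_fst_prefix (n : Nat) (l : List Nat) (st : List (List Int) × List Int) :
    ∃ t, (l.foldl (pvAStep n) st).1 = st.1 ++ t := by
  induction l generalizing st with
  | nil => exact ⟨[], by simp⟩
  | cons a l ih =>
    obtain ⟨u, hu⟩ := pv_astep_fst n st a
    obtain ⟨t, ht⟩ := ih (pvAStep n st a)
    exact ⟨u ++ t, by rw [List.foldl_cons, ht, hu, List.append_assoc]⟩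

-- ===== VERDICT (by name: the statement is the Claim_ definition above) =====
theorem make_nat_mix_from_rank_spec : Claim_unchanged_make_nat_mix_from_rank := by
  intro rank _
  unfold Spec_make_nat_mix_from_rank
  intro hD
  rcases List.eq_nil_or_concat rank with rfl | hne
  · rfl
  · have hne' : rank ≠ [] := by rcases hne with ⟨_, _, rfl⟩; simp
    have hall : ¬ ∀ v ∈ rank, v < -1 := fun h =>
      hD ⟨hne', h⟩
    unfold make_nat_mix_from_rank
    rw [pv_loop rank hall rank.length le_rfl, pv_alt_eq]

theorem make_nat_mix_from_rank_changed : Claim_changed_make_nat_mix_from_rank := by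
  unfold Claim_changed_make_nat_mix_from_rank; decide

theorem make_nat_mix_from_rank_tight : Claim_exact_make_nat_mix_from_rank := by
  intro rank _ hD heq
  obtain ⟨hne, hall⟩ := hD
  obtain ⟨n, hn⟩ : ∃ n, rank.length = n + 1 := by
    cases h : rank.length with
    | zero => exact absurd (List.length_eq_zero_iff.mp h) hne
    | succ n => exact ⟨n, rfl⟩
  obtain ⟨m, hm⟩ : ∃ m, PySem.List.max? rank (fun x => x) = some m := by
    cases h : PySem.List.max? rank (fun x => x) with
    | none => exact absurd (PySem.List.max?_eq_none_iff rank _ |>.mp h) hne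
    | some m => exact ⟨m, rfl⟩
  obtain ⟨ch, hch⟩ : ∃ ch, PySem.List.index? rank m = some ch := by
    cases h : PySem.List.index? rank m with
    | none => exact absurd (PySem.List.index?_eq_none_iff rank m |>.mp h) (by
        simp [PySem.List.max?_mem hm])
    | some ch => exact ⟨ch, rfl⟩
  obtain ⟨hchlt, hchv, _⟩ := PySem.List.getElem_of_index?_eq_some hch
  have hchn : ch < rank.length := by omega
  -- abbreviate A's first current_mix before the pick
  set C : List Int := (List.range rank.length).foldl
      (fun c cOk => if rank.getD cOk 0 = -1 then c.set cOk 1 else c)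
      (List.replicate rank.length 0) with hC
  have hClen : C.length = rank.length := by
    rw [hC, pv_markfold_length, List.length_replicate]
  -- A's first row carries a 1 at the first argmax ch
  have hstep0 : pvAStep rank.length ([], rank) 0 = ([C.set ch 1], rank.set ch (-1)) := by
    unfold pvAStep
    dsimp only
    rw [hm, Option.getD_some, hch, hC]
    rfl
  have hrange : List.range rank.length = 0 :: (List.range n).map Nat.succ := by
    rw [hn, List.range_succ_eq_map]
  have hA0 : (make_nat_mix_from_rank rank)[0]? = some (C.set ch 1) := by
    unfold make_nat_mix_from_rank
    conv_lhs => rw [hrange]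
    rw [List.foldl_cons, hstep0]
    obtain ⟨t, ht⟩ := pv_fold_fst_prefix rank.length ((List.range n).map Nat.succ)
      ([C.set ch 1], rank.set ch (-1))
    rw [ht]
    simp
  -- B's first row is all zeros at ch
  have hsigch : pvSig rank ch = none := by
    have hv : rank.getD ch 0 < -1 := hall _ (by
      rw [List.getD_eq_getElem _ 0 hchn]; exact List.getElem_mem hchn)
    unfold pvSig
    rw [if_neg (by omega), if_neg (by omega)]
  have hB0 : (make_nat_mix_from_rank_alt rank)[0]? = some (pvRow rank 0) := by
    rw [pv_alt_eq, List.getElem?_map, List.getElem?_range (by omega), Option.map_some]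
  have hAe : (C.set ch 1)[ch]? = some 1 := by
    rw [List.getElem?_eq_getElem (by rw [List.length_set, hClen]; exact hchn)]
    rw [List.getElem_set_self]
  have hBe : (pvRow rank 0)[ch]? = some 0 := by
    rw [pv_row_getElem? rank 0 ch hchn, hsigch]
  rw [heq, hB0] at hA0
  have hrows : pvRow rank 0 = C.set ch 1 := Option.some_inj.mp hA0
  rw [hrows, hAe] at hBe
  exact absurd (Option.some_inj.mp hBe) (by norm_num)
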